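-- pv_equiv track=rewrite | github.com/becauselol/15.094-Robust-Optimization-Project | scripts/monitor_pipeline.py | _task_ids_to_spec
-- ===== SOURCE A (Python) =====
-- def _task_ids_to_spec(ids: list) -> str:
--     """Convert [1,2,3,5] -> '1-3,5' (compact SLURM array spec)."""
--     if not ids:
--         return ""
--     sorted_ids = sorted(set(ids))
--     parts = []
--     start = prev = sorted_ids[0]
--     for cur in sorted_ids[1:]:
--         if cur == prev + 1:
--             prev = cur
--         else:
--             parts.append(f"{start}-{prev}" if prev != start else str(start))
--             start = prev = cur
--     parts.append(f"{start}-{prev}" if prev != start else str(start))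
--     return ",".join(parts)
-- ===== SOURCE B (Python) =====
-- def _task_ids_to_spec(ids: list) -> str:
--     """Convert [1,2,3,5] -> '1-3,5' (compact SLURM array spec)."""
--     runs = {}
--     for i, v in enumerate(sorted(set(ids))):
--         runs.setdefault(v - i, []).append(v)
--     return ",".join(
--         f"{g[0]}-{g[-1]}" if len(g) > 1 else str(g[0]) for g in runs.values()
--     )
-- ===== Notes on version B (the rewrite author's own statement) =====
-- stated objective: alternative
-- what changed: Replaces the running start/prev state machine (with trailing flush and empty-input guard) by a staged dict grouping: each sorted unique id is bucketed under the invariant key value-minus-index, so every bucket is one maximal consecutive run and no adjacency comparison or loop-carried run state exists; formatting is a second pass over the bucket lists.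
import Mathlib
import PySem

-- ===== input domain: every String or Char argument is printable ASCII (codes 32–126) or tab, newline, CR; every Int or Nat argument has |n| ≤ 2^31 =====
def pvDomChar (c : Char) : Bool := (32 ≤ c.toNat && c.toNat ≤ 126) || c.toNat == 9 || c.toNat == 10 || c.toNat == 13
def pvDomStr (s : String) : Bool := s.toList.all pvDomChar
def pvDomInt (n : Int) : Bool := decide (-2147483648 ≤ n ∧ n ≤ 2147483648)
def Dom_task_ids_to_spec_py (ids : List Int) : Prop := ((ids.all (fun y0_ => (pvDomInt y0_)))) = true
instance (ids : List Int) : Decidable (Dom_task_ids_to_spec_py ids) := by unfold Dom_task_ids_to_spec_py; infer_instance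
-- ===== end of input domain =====

-- B replaces A's running start/prev state machine (with its trailing flush and empty-input
-- guard) by a staged dict grouping keyed by value-minus-index: every bucket is one maximal
-- consecutive run, formatted in a second pass (alternative decomposition; return value only).

-- ===== PORT A =====
-- f"{start}-{prev}" if prev != start else str(start)
def pvFmtA (start prev : Int) : String :=
  if prev ≠ start then PySem.Str.join "-" [PySem.Int.toStr start, PySem.Int.toStr prev]
  else PySem.Int.toStr start

def task_ids_to_spec_py (ids : List Int) : String :=
  if ids = [] then ""
  else
    match PySem.List.sorted (PySem.Set.ofList ids) (fun x => x) false with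
    | [] => ""  -- unreachable (sorted(set(ids)) of nonempty ids is nonempty; Python would index-error)
    | h :: t =>
      let st := t.foldl (fun (acc : List String × Int × Int) cur =>
        if cur = acc.2.2 + 1 then (acc.1, acc.2.1, cur)
        else (acc.1 ++ [pvFmtA acc.2.1 acc.2.2], cur, cur)) ([], h, h)
      PySem.Str.join "," (st.1 ++ [pvFmtA st.2.1 st.2.2])

-- ===== PORT B =====
-- f"{a}-{b}"
def pvFmtB (a b : Int) : String :=
  PySem.Str.join "-" [PySem.Int.toStr a, PySem.Int.toStr b]

-- f"{g[0]}-{g[-1]}" if len(g) > 1 else str(g[0])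
-- (the [] branch is unreachable: every dict bucket is created non-empty)
def pvFmtG : List Int → String
  | [] => ""
  | a :: rest => if 1 < (a :: rest).length then pvFmtB a (rest.getLastD a) else PySem.Int.toStr a

-- runs = {}; for i, v in enumerate(sorted(set(ids))): runs.setdefault(v - i, []).append(v)
-- then ",".join(format(g) for g in runs.values())
def task_ids_to_spec_py_alt (ids : List Int) : String :=
  let s := PySem.List.sorted (PySem.Set.ofList ids) (fun x => x) false
  let runs := (PySem.List.enumerate s).foldl
      (fun (d : PySem.Dict Int (List Int)) p => d.modify (p.2 - p.1) [] (· ++ [p.2]))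
      PySem.Dict.empty
  PySem.Str.join "," (runs.values.map pvFmtG)

-- ===== PRECONDITION & SPEC =====
def Spec_task_ids_to_spec_py (ids : List Int) (out : String) : Prop := out = task_ids_to_spec_py_alt ids
instance (ids : List Int) (out : String) : Decidable (Spec_task_ids_to_spec_py ids out) := by unfold Spec_task_ids_to_spec_py; infer_instance

-- ===== CLAIM (what is proved, stated in full; the proofs are below) =====
def Claim_equal_task_ids_to_spec_py : Prop := ∀ (ids : List Int), Dom_task_ids_to_spec_py ids → Spec_task_ids_to_spec_py ids (task_ids_to_spec_py ids)

-- ===== LEMMAS AND PROOFS =====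

-- A's remaining output as a function of the loop state (start, prev)
def pvG : List Int → Int → Int → List String
  | [], start, prev => [pvFmtA start prev]
  | c :: t, start, prev =>
    if c = prev + 1 then pvG t start c
    else pvFmtA start prev :: pvG t c c

theorem pvFold_eq_pvG (t : List Int) : ∀ (parts : List String) (start prev : Int),
    (let st := t.foldl (fun (acc : List String × Int × Int) cur =>
        if cur = acc.2.2 + 1 then (acc.1, acc.2.1, cur)
        else (acc.1 ++ [pvFmtA acc.2.1 acc.2.2], cur, cur)) (parts, start, prev)
     st.1 ++ [pvFmtA st.2.1 st.2.2]) = parts ++ pvG t start prev := by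
  induction t with
  | nil => intro parts start prev; simp [pvG]
  | cons c t ih =>
    intro parts start prev
    simp only [List.foldl_cons, pvG]
    by_cases hcur : c = prev + 1
    · simp [hcur, ih]
    · rw [if_neg hcur, if_neg hcur, ih, List.append_assoc]; rfl

-- modify at the dict's LAST key rewrites that bucket in place
theorem pvStepPresent (d : PySem.Dict Int (List Int)) (front : List (Int × List Int))
    (k : Int) (g : List Int) (f : List Int → List Int)
    (hit : d.items = front ++ [(k, g)])
    (hfr : ∀ p ∈ front, p.1 ≠ k)
    (hnd : d.keys.Nodup) :
    (d.modify k [] f).items = front ++ [(k, f g)] := by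
  have hmem : (k, g) ∈ d.items := by rw [hit]; simp
  have hget : d.getD k [] = g := PySem.Dict.getD_of_mem_items d hmem hnd []
  have hcon : d.contains k = true := by
    rw [PySem.Dict.contains_iff_mem_keys]
    exact PySem.Dict.mem_keys_of_mem_items d hmem
  show (d.insert k (f (d.getD k []))).items = _
  rw [hget, PySem.Dict.items_insert_of_contains d (f g) hcon, hit, List.map_append]
  congr 1
  · rw [List.map_congr_left (g := id) (fun p hp => by simp [hfr p hp]), List.map_id]
  · simp

-- modify at a fresh key appends a new bucket
theorem pvStepFresh (d : PySem.Dict Int (List Int)) (k : Int) (f : List Int → List Int)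
    (hcon : d.contains k = false) :
    (d.modify k [] f).items = d.items ++ [(k, f [])] := by
  have hget : d.getD k [] = [] := PySem.Dict.getD_of_not_contains d [] hcon
  show (d.insert k (f (d.getD k []))).items = _
  rw [hget, PySem.Dict.items_insert_of_not_contains d (f []) hcon]

-- formatting a bucket that is exactly the run [start..prev]
theorem pvFmtG_eq (start prev : Int) (h : start ≤ prev) :
    pvFmtG (PySem.List.pyRange start (prev + 1) 1) = pvFmtA start prev := by
  rcases eq_or_lt_of_le h with heq | hlt
  · subst heq
    rw [PySem.List.pyRange_one_singleton]
    simp [pvFmtG, pvFmtA]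
  · rw [PySem.List.pyRange_one_cons (by omega)]
    have htail : PySem.List.pyRange (start + 1) (prev + 1) 1
        = PySem.List.pyRange (start + 1) prev 1 ++ [prev] := by
      rw [← PySem.List.pyRange_one_succ_right (by omega)]
    simp only [pvFmtG, htail]
    rw [if_pos (by
      simp only [List.length_cons, List.length_append, PySem.List.length_pyRange_one,
        List.length_nil]
      omega)]
    rw [show pvFmtA start prev = pvFmtB start prev by
      simp [pvFmtA, pvFmtB, show prev ≠ start by omega]]
    simp

-- the grouping loop, run by run: the dict's buckets under the invariant key v - i are
-- exactly the maximal consecutive runs A's state machine emits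
theorem pvLoop (t : List Int) : ∀ (i : Int) (d : PySem.Dict Int (List Int))
    (front : List (Int × List Int)) (start prev : Int),
    d.items = front ++ [(prev - i, PySem.List.pyRange start (prev + 1) 1)] →
    start ≤ prev →
    List.Pairwise (· < ·) (d.items.map (·.1)) →
    List.Pairwise (· < ·) (prev :: t) →
    ((PySem.List.enumerate t (i + 1)).foldl
        (fun d p => d.modify (p.2 - p.1) [] (· ++ [p.2])) d).values.map pvFmtG
      = front.map (fun p => pvFmtG p.2) ++ pvG t start prev := by
  induction t with
  | nil =>
    intro i d front start prev hit hsp _ _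
    simp only [PySem.List.enumerate_nil, List.foldl_nil, pvG]
    show (d.items.map (·.2)).map pvFmtG = _
    rw [hit]
    simp [Function.comp, pvFmtG_eq start prev hsp]
  | cons c t ih =>
    intro i d front start prev hit hsp hkeys hchain
    have hpc : prev < c := (List.pairwise_cons.mp hchain).1 c List.mem_cons_self
    have hchain' : List.Pairwise (· < ·) (c :: t) := (List.pairwise_cons.mp hchain).2
    rw [PySem.List.enumerate_cons, List.foldl_cons]
    have hkeq : d.items.map (·.1) = front.map (·.1) ++ [prev - i] := by
      rw [hit]; simp
    have hkeys' : List.Pairwise (· < ·) (front.map (·.1) ++ [prev - i]) := by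
      rwa [hkeq] at hkeys
    have hfrlt : ∀ p ∈ front, p.1 < prev - i := by
      intro p hp
      exact (List.pairwise_append.mp hkeys').2.2 p.1 (List.mem_map_of_mem hp) (prev - i) (by simp)
    by_cases hc : c = prev + 1
    · -- same run: the key c - (i+1) equals prev - i, the last bucket grows in place
      subst hc
      have hnd : d.keys.Nodup := by
        show (d.items.map (·.1)).Nodup
        exact hkeys.nodup
      have hstep := pvStepPresent d front (prev - i)
        (PySem.List.pyRange start (prev + 1) 1) (· ++ [prev + 1]) hit
        (fun p hp => ne_of_lt (hfrlt p hp)) hnd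
      show ((PySem.List.enumerate t (i + 1 + 1)).foldl
          (fun d p => d.modify (p.2 - p.1) [] (· ++ [p.2]))
          (d.modify (prev + 1 - (i + 1)) [] (· ++ [prev + 1]))).values.map pvFmtG = _
      rw [show prev + 1 - (i + 1) = prev - i from by ring]
      rw [show pvG ((prev + 1) :: t) start prev = pvG t start (prev + 1) from by simp [pvG]]
      exact ih (i + 1) (d.modify (prev - i) [] (· ++ [prev + 1])) front start (prev + 1)
        (by rw [hstep, show prev + 1 - (i + 1) = prev - i from by ring,
              PySem.List.pyRange_one_succ_right (show start ≤ prev + 1 by omega)])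
        (by omega)
        (by rw [hstep]
            simpa using hkeys')
        hchain'
    · -- new run: the key c - (i+1) is strictly larger than every key, fresh bucket
      have hcon : d.contains (c - (i + 1)) = false := by
        rw [← Bool.not_eq_true, PySem.Dict.contains_iff_mem_keys]
        show ¬ (c - (i + 1)) ∈ d.items.map (·.1)
        rw [hkeq]
        intro hmem
        rcases List.mem_append.mp hmem with hmem | hmem
        · obtain ⟨p, hp, hpe⟩ := List.mem_map.mp hmem
          have := hfrlt p hp; omega
        · simp at hmem; omega
      have hstep := pvStepFresh d (c - (i + 1)) (· ++ [c]) hcon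
      show ((PySem.List.enumerate t (i + 1 + 1)).foldl
          (fun d p => d.modify (p.2 - p.1) [] (· ++ [p.2]))
          (d.modify (c - (i + 1)) [] (· ++ [c]))).values.map pvFmtG = _
      rw [show pvG (c :: t) start prev = pvFmtA start prev :: pvG t c c from by
            simp [pvG, hc]]
      rw [ih (i + 1) (d.modify (c - (i + 1)) [] (· ++ [c]))
            (front ++ [(prev - i, PySem.List.pyRange start (prev + 1) 1)]) c c
        (by rw [hstep, hit]
            simp [PySem.List.pyRange_one_singleton])
        le_rfl
        (by rw [hstep,
              List.map_append, hkeq]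
            refine List.pairwise_append.mpr ⟨hkeys', by simp, ?_⟩
            intro a ha b hb
            simp only [List.map_cons, List.map_nil, List.mem_singleton] at hb
            subst hb
            rcases List.mem_append.mp ha with ha | ha
            · obtain ⟨p, hp, hpe⟩ := List.mem_map.mp ha
              have := hfrlt p hp; omega
            · simp at ha; omega)
        hchain']
      simp [pvFmtG_eq start prev hsp]

theorem pv_sorted_nonempty (ids : List Int) (h : ids ≠ []) :
    PySem.List.sorted (PySem.Set.ofList ids) (fun x => x) false ≠ [] := by
  intro hs
  rw [PySem.List.sorted_eq_nil_iff] at hs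
  cases ids with
  | nil => exact h rfl
  | cons a l =>
    have : a ∈ PySem.Set.ofList (a :: l) := by
      rw [PySem.Set.mem_ofList]; exact List.mem_cons_self
    rw [hs] at this
    exact absurd this (List.not_mem_nil)

-- ===== VERDICT (by name: the statement is the Claim_ definition above) =====
theorem task_ids_to_spec_py_spec : Claim_equal_task_ids_to_spec_py := by
  intro ids _
  unfold Spec_task_ids_to_spec_py task_ids_to_spec_py task_ids_to_spec_py_alt
  by_cases hid : ids = []
  · subst hid
    rfl
  · rw [if_neg hid]
    have hne := pv_sorted_nonempty ids hid
    have hpw : (PySem.List.sorted (PySem.Set.ofList ids) (fun x => x) false).Pairwise (· < ·) :=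
      PySem.List.sorted_ofList_pairwise_lt ids
    cases hs : PySem.List.sorted (PySem.Set.ofList ids) (fun x => x) false with
    | nil => exact absurd hs hne
    | cons h t =>
      simp only
      rw [pvFold_eq_pvG t [] h h, List.nil_append]
      rw [hs] at hpw
      -- first iteration: the empty dict gets its first bucket [(h, [h])]
      rw [PySem.List.enumerate_cons, List.foldl_cons]
      have hstep := pvStepFresh PySem.Dict.empty (h - 0) (· ++ [h])
        (by rw [PySem.Dict.contains_empty])
      have hloop := pvLoop t 0 (PySem.Dict.empty.modify (h - 0) [] (· ++ [h])) [] h h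
        (by rw [hstep]
            simp [PySem.List.pyRange_one_singleton, PySem.Dict.empty])
        le_rfl
        (by rw [hstep]
            simp [PySem.Dict.empty])
        hpw
      rw [hloop, List.map_nil, List.nil_append]
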